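-- pv_equiv track=rewrite | github.com/TanyaAng/Automated_Shear_Walls_Calculations | helpers/find_current_shear_wall_index.py | find_current_shear_wall_index
-- ===== SOURCE A (Python) =====
-- def find_current_shear_wall_index(number_of_shear_wall):
--     next_starting_column = 'H8'
--     next_ending_column = 'H11'
--     if number_of_shear_wall >= 1:
--         list_alpha = []
--         list_digit = []
--         for symbol in next_starting_column:
--             if symbol.isdigit():
--                 list_digit.append(symbol)
--             elif symbol.isalpha():
--                 list_alpha.append(symbol)
--         string_of_digits = [str(el) for el in list_digit]
--         int_of_digits = int(''.join(string_of_digits))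
--         next_starting_column = str(int_of_digits + 12 * (number_of_shear_wall))
--         string_of_alpha = ''.join(list_alpha)
--         next_starting_column = string_of_alpha + next_starting_column
--         list_alpha = []
--         list_digit = []
--         for symbol in next_ending_column:
--             if symbol.isdigit():
--                 list_digit.append(symbol)
--             elif symbol.isalpha():
--                 list_alpha.append(symbol)
--         string_of_digits = [str(el) for el in list_digit]
--         int_of_digits = int(''.join(string_of_digits))
--         next_ending_column = str(int_of_digits + 12 * (number_of_shear_wall))
--         string_of_alpha = ''.join(list_alpha)
--         next_ending_column = string_of_alpha + next_ending_column
--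
--     return next_starting_column, next_ending_column
-- ===== SOURCE B (Python) =====
-- def find_current_shear_wall_index(number_of_shear_wall):
--     if number_of_shear_wall >= 1:
--         step = 12 * number_of_shear_wall
--         return 'H' + str(8 + step), 'H' + str(11 + step)
--     return 'H8', 'H11'
-- ===== Notes on version B (the rewrite author's own statement) =====
-- stated objective: simpler
-- what changed: Replaced the two character-classification loops and string re-parsing of the constant cells 'H8'/'H11' by a direct closed-form arithmetic expression building 'H'+str(8+12*n) and 'H'+str(11+12*n).
import Mathlib
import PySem

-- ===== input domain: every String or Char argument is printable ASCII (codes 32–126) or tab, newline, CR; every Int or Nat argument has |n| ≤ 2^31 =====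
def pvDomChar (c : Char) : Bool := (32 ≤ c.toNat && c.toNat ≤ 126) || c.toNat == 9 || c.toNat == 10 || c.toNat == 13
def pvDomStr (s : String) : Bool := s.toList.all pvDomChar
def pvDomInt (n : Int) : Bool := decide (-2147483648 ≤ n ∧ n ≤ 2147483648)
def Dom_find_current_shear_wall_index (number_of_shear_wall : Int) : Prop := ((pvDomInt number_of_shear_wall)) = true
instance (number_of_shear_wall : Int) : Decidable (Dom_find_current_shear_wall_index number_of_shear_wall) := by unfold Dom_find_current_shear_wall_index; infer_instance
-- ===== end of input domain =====

-- B replaces A's character-classification loops over the constant cells 'H8'/'H11'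
-- by a closed-form arithmetic expression (objective: simpler).


-- ===== PORT A =====
-- the per-cell body of A's branch: classify characters into digits/alphas, re-parse
-- the digits with int(), add 12*n, re-prefix the alphas.
def pvBumpCell (cell : String) (n : Int) : String :=
  let st := cell.toList.foldl (fun (st : List Char × List Char) symbol =>
    if PySem.Chars.isdigit symbol then (st.1, st.2 ++ [symbol])
    else if PySem.Chars.isalpha symbol then (st.1 ++ [symbol], st.2)
    else st) ([], [])
  -- int(''.join(string_of_digits)): both cells contain a digit, so int() never raises;
  -- ofStr? is some here and .getD 0 is exact.
  let int_of_digits := (PySem.Int.ofStr? (String.mk st.2)).getD 0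
  let next := PySem.Int.toStr (int_of_digits + 12 * n)
  String.mk st.1 ++ next

def find_current_shear_wall_index (number_of_shear_wall : Int) : String × String :=
  let next_starting_column := "H8"
  let next_ending_column := "H11"
  if number_of_shear_wall ≥ 1 then
    (pvBumpCell next_starting_column number_of_shear_wall,
     pvBumpCell next_ending_column number_of_shear_wall)
  else
    (next_starting_column, next_ending_column)

-- ===== PORT B =====
def find_current_shear_wall_index_alt (number_of_shear_wall : Int) : String × String :=
  if number_of_shear_wall ≥ 1 then
    let step := 12 * number_of_shear_wall
    ("H" ++ PySem.Int.toStr (8 + step), "H" ++ PySem.Int.toStr (11 + step))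
  else
    ("H8", "H11")

-- ===== PRECONDITION & SPEC =====
def Spec_find_current_shear_wall_index (number_of_shear_wall : Int) (out : String × String) : Prop := out = find_current_shear_wall_index_alt number_of_shear_wall
instance (number_of_shear_wall : Int) (out : String × String) : Decidable (Spec_find_current_shear_wall_index number_of_shear_wall out) := by unfold Spec_find_current_shear_wall_index; infer_instance

-- ===== CLAIM (what is proved, stated in full; the proofs are below) =====
def Claim_equal_find_current_shear_wall_index : Prop := ∀ (number_of_shear_wall : Int), Dom_find_current_shear_wall_index number_of_shear_wall → Spec_find_current_shear_wall_index number_of_shear_wall (find_current_shear_wall_index number_of_shear_wall)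

-- ===== LEMMAS AND PROOFS =====
theorem pvBumpCell_H8 (n : Int) : pvBumpCell "H8" n = "H" ++ PySem.Int.toStr (8 + 12 * n) := by
  simp [pvBumpCell, PySem.Chars.isdigit, PySem.Chars.isalpha, PySem.Int.ofStr?,
    String.toList, PySem.Int.toStr]
  rfl

theorem pvBumpCell_H11 (n : Int) : pvBumpCell "H11" n = "H" ++ PySem.Int.toStr (11 + 12 * n) := by
  simp [pvBumpCell, PySem.Chars.isdigit, PySem.Chars.isalpha, PySem.Int.ofStr?,
    String.toList, PySem.Int.toStr]
  rfl

-- ===== VERDICT (by name: the statement is the Claim_ definition above) =====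
theorem find_current_shear_wall_index_spec : Claim_equal_find_current_shear_wall_index := by
  intro n _
  unfold Spec_find_current_shear_wall_index find_current_shear_wall_index find_current_shear_wall_index_alt
  by_cases h : n ≥ 1
  · simp [h, pvBumpCell_H8, pvBumpCell_H11]
  · simp [h]
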